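-- pv_equiv track=rewrite | github.com/kmcnaught/streamlit-tdpages | word_utils.py | remove_case_duplicates
-- ===== SOURCE A (Python) =====
-- def remove_case_duplicates(words):
--
--     # Set to track seen lowercase words
--     seen = set()
--
--     # List to store the result
--     final_words = dict()
--
--     for word in words:
--         # Convert word to lowercase for comparison
--         lower_word = word.lower()
--
--         # Add the word to the result if the lowercase version is not already present
--         # or if this is a lower case
--         if lower_word not in seen:
--             seen.add(lower_word)
--             final_words[lower_word] = word
--         elif lower_word==word:
--             final_words[lower_word] = word
--
--     return list(final_words.values())
-- ===== SOURCE B (Python) =====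
-- def remove_case_duplicates(words):
--     # Group words by their lowercase form in one pass (dict preserves first-appearance key order),
--     # then select per group: the lowercase key if it occurs verbatim, else the first word seen.
--     groups = {}
--     for word in words:
--         groups.setdefault(word.lower(), []).append(word)
--     result = []
--     for key, group in groups.items():
--         result.append(key if key in group else group[0])
--     return result
-- ===== Notes on version B (the rewrite author's own statement) =====
-- stated objective: alternative
-- what changed: Replaces A's seen-set plus conditional-overwrite dict with a group-by-lowercase index built in one pass followed by a separate selection pass over the groups (key if present verbatim, else first word of the group).
import Mathlib
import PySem

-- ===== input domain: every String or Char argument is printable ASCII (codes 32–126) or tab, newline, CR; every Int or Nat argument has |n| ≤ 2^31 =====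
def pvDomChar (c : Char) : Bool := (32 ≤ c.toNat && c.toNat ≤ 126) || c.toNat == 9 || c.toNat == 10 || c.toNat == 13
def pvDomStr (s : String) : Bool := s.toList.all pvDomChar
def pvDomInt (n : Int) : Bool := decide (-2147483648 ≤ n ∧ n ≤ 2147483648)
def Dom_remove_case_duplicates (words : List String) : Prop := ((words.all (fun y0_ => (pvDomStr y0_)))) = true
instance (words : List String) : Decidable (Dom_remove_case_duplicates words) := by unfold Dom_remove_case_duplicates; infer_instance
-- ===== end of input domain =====

-- B replaces A's seen-set + conditional-overwrite dict with a group-by-lowercase index built in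
-- one pass followed by a selection pass over the groups; the return values are proved equal.

-- ===== PORT A =====
-- A's loop body: state = (seen set, result dict), updated per word exactly as the Python does
def rcdStep (st : PySem.Set String × PySem.Dict String String) (word : String) :
    PySem.Set String × PySem.Dict String String :=
  let lw := PySem.Str.lower word
  if ¬ (PySem.Set.contains st.1 lw) then (PySem.Set.add st.1 lw, st.2.insert lw word)
  else if lw = word then (st.1, st.2.insert lw word)
  else st

def remove_case_duplicates (words : List String) : List String :=
  (words.foldl rcdStep (PySem.Set.empty, PySem.Dict.empty)).2.values

-- ===== PORT B =====
-- first pass of Source B: groups.setdefault(word.lower(), []).append(word) — Dict.modify models the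
-- in-place append to the list stored (or freshly defaulted) at that key
def rcd_groups (words : List String) : PySem.Dict String (List String) :=
  words.foldl (fun d w => d.modify (PySem.Str.lower w) [] (fun g => g ++ [w])) PySem.Dict.empty

-- second pass of Source B: result.append(key if key in group else group[0]) over groups.items()
def remove_case_duplicates_alt (words : List String) : List String :=
  (rcd_groups words).items.foldl
    (fun acc p => acc ++ [if p.1 ∈ p.2 then p.1 else PySem.List.pyGetD p.2 0 ""]) []

-- ===== PRECONDITION & SPEC =====
def Spec_remove_case_duplicates (words : List String) (out : List String) : Prop := out = remove_case_duplicates_alt words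
instance (words : List String) (out : List String) : Decidable (Spec_remove_case_duplicates words out) := by unfold Spec_remove_case_duplicates; infer_instance

-- ===== CLAIM (what is proved, stated in full; the proofs are below) =====
def Claim_equal_remove_case_duplicates : Prop := ∀ (words : List String), Dom_remove_case_duplicates words → Spec_remove_case_duplicates words (remove_case_duplicates words)

-- ===== LEMMAS AND PROOFS =====

theorem rcdStep_not_seen (s : PySem.Set String) (d : PySem.Dict String String) (w : String)
    (hc : ¬ PySem.Set.contains s (PySem.Str.lower w) = true) :
    rcdStep (s, d) w = (s ++ [PySem.Str.lower w], d.insert (PySem.Str.lower w) w) := by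
  have hn : PySem.Str.lower w ∉ s := fun h => hc ((PySem.Set.contains_iff _ _).mpr h)
  simp only [rcdStep]
  rw [if_pos hc, PySem.Set.add_of_not_mem hn]

theorem rcdStep_seen_eq (s : PySem.Set String) (d : PySem.Dict String String) (w : String)
    (hc : PySem.Set.contains s (PySem.Str.lower w) = true) (he : PySem.Str.lower w = w) :
    rcdStep (s, d) w = (s, d.insert (PySem.Str.lower w) w) := by
  simp only [rcdStep]
  rw [if_neg (by simp [(PySem.Set.contains_iff _ _).mp hc]), if_pos he]

theorem rcdStep_seen_ne (s : PySem.Set String) (d : PySem.Dict String String) (w : String)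
    (hc : PySem.Set.contains s (PySem.Str.lower w) = true) (he : ¬ PySem.Str.lower w = w) :
    rcdStep (s, d) w = (s, d) := by
  simp only [rcdStep]
  rw [if_neg (by simp [(PySem.Set.contains_iff _ _).mp hc]), if_neg he]

-- A's fold: the dict keys are the lowercased words, first occurrences in order
theorem rcd_keys (ws : List String) (s : PySem.Set String) (d : PySem.Dict String String)
    (hs : s = d.keys) :
    (ws.foldl rcdStep (s, d)).2.keys = PySem.Set.update d.keys (ws.map PySem.Str.lower) := by
  induction ws generalizing s d with
  | nil => simp [PySem.Set.update_nil]
  | cons w rest ih =>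
    simp only [List.foldl_cons, List.map_cons, PySem.Set.update_cons]
    by_cases hc : PySem.Set.contains s (PySem.Str.lower w) = true
    · have hmem : PySem.Str.lower w ∈ d.keys := hs ▸ (PySem.Set.contains_iff _ _).mp hc
      have hdc : d.contains (PySem.Str.lower w) = true :=
        (PySem.Dict.contains_iff_mem_keys _ _).mpr hmem
      rw [PySem.Set.add_of_mem hmem]
      by_cases he : PySem.Str.lower w = w
      · rw [rcdStep_seen_eq s d w hc he,
          ih _ _ (by rw [hs, PySem.Dict.keys_insert_of_contains d w hdc]),
          PySem.Dict.keys_insert_of_contains d w hdc]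
      · rw [rcdStep_seen_ne s d w hc he]
        exact ih _ _ hs
    · have hnmem : PySem.Str.lower w ∉ d.keys :=
        fun h => hc ((PySem.Set.contains_iff _ _).mpr (hs ▸ h))
      have hdc : d.contains (PySem.Str.lower w) = false := by
        cases h : d.contains (PySem.Str.lower w)
        · rfl
        · exact absurd ((PySem.Dict.contains_iff_mem_keys _ _).mp h) hnmem
      rw [PySem.Set.add_of_not_mem hnmem, rcdStep_not_seen s d w hc,
        ih _ _ (by rw [hs, PySem.Dict.keys_insert_of_not_contains d w hdc]),
        PySem.Dict.keys_insert_of_not_contains d w hdc]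

-- A's fold: lookup characterisation — the key itself if it occurs verbatim in its group,
-- otherwise the stored value, otherwise the first group member
theorem rcd_get? (ws : List String) (s : PySem.Set String) (d : PySem.Dict String String)
    (hs : s = d.keys) (hnd : d.keys.Nodup) (k : String) :
    (ws.foldl rcdStep (s, d)).2.get? k =
      (if k ∈ ws.filter (fun w => PySem.Str.lower w == k) then some k
       else match d.get? k with
            | some v => some v
            | none => (ws.filter (fun w => PySem.Str.lower w == k)).head?) := by
  induction ws generalizing s d with
  | nil =>
    cases h : d.get? k <;> simp [h]
  | cons w rest ih =>
    simp only [List.foldl_cons]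
    by_cases heq : PySem.Str.lower w = k
    · -- this word falls in key k's group
      rw [List.filter_cons_of_pos (by simp [heq])]
      by_cases hc : PySem.Set.contains s (PySem.Str.lower w) = true
      · have hmem : PySem.Str.lower w ∈ d.keys := hs ▸ (PySem.Set.contains_iff _ _).mp hc
        have hdc : d.contains (PySem.Str.lower w) = true :=
          (PySem.Dict.contains_iff_mem_keys _ _).mpr hmem
        by_cases he : PySem.Str.lower w = w
        · -- overwrite with the lowercase word itself; w = k
          have hwk : w = k := he ▸ heq
          rw [rcdStep_seen_eq s d w hc he,
            ih _ _ (by rw [hs, PySem.Dict.keys_insert_of_contains d w hdc])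
              (by rw [PySem.Dict.keys_insert_of_contains d w hdc]; exact hnd)]
          rw [heq, hwk, PySem.Dict.get?_insert_self]
          by_cases hkr : k ∈ rest.filter (fun w => PySem.Str.lower w == k) <;>
            simp_all
        · -- already seen, not lowercase: no change; w ≠ k
          have hwk : w ≠ k := fun h => he (h ▸ heq)
          rw [rcdStep_seen_ne s d w hc he, ih _ _ hs hnd]
          obtain ⟨v, hv⟩ : ∃ v, d.get? k = some v := by
            have := PySem.Dict.contains_eq_isSome_get? d k
            rw [heq] at hdc; rw [hdc] at this
            exact Option.isSome_iff_exists.mp this.symm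
          by_cases hkr : k ∈ rest.filter (fun w => PySem.Str.lower w == k) <;>
            simp [hkr, hv, Ne.symm hwk]
      · -- first occurrence of this key
        have hnmem : PySem.Str.lower w ∉ d.keys :=
          fun h => hc ((PySem.Set.contains_iff _ _).mpr (hs ▸ h))
        have hdc : d.contains (PySem.Str.lower w) = false := by
          cases h : d.contains (PySem.Str.lower w)
          · rfl
          · exact absurd ((PySem.Dict.contains_iff_mem_keys _ _).mp h) hnmem
        have hget : d.get? k = none := by
          rw [← heq]
          exact (PySem.Dict.get?_eq_none_iff_not_mem_keys d _).mpr hnmem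
        rw [rcdStep_not_seen s d w hc,
          ih _ _ (by rw [hs, PySem.Dict.keys_insert_of_not_contains d w hdc])
            (by rw [PySem.Dict.keys_insert_of_not_contains d w hdc]
                simp only [List.nodup_append, List.nodup_cons, List.not_mem_nil,
                  not_false_eq_true, List.nodup_nil, hnd, true_and]
                exact fun a ha b hb h => hnmem ((List.mem_singleton.mp hb ▸ h ▸ ha))),
          heq, PySem.Dict.get?_insert_self, hget]
        by_cases hwk : w = k
        · by_cases hkr : k ∈ rest.filter (fun w => PySem.Str.lower w == k) <;>
            simp [hkr, hwk]
        · by_cases hkr : k ∈ rest.filter (fun w => PySem.Str.lower w == k) <;>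
            simp [hkr, Ne.symm hwk]
    · -- word irrelevant to key k
      rw [List.filter_cons_of_neg (by simp [heq])]
      by_cases hc : PySem.Set.contains s (PySem.Str.lower w) = true
      · have hmem : PySem.Str.lower w ∈ d.keys := hs ▸ (PySem.Set.contains_iff _ _).mp hc
        have hdc : d.contains (PySem.Str.lower w) = true :=
          (PySem.Dict.contains_iff_mem_keys _ _).mpr hmem
        by_cases he : PySem.Str.lower w = w
        · rw [rcdStep_seen_eq s d w hc he,
            ih _ _ (by rw [hs, PySem.Dict.keys_insert_of_contains d w hdc])
              (by rw [PySem.Dict.keys_insert_of_contains d w hdc]; exact hnd),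
            PySem.Dict.get?_insert_of_ne d w (fun h => heq h.symm)]
        · rw [rcdStep_seen_ne s d w hc he]
          exact ih _ _ hs hnd
      · have hnmem : PySem.Str.lower w ∉ d.keys :=
          fun h => hc ((PySem.Set.contains_iff _ _).mpr (hs ▸ h))
        have hdc : d.contains (PySem.Str.lower w) = false := by
          cases h : d.contains (PySem.Str.lower w)
          · rfl
          · exact absurd ((PySem.Dict.contains_iff_mem_keys _ _).mp h) hnmem
        rw [rcdStep_not_seen s d w hc,
          ih _ _ (by rw [hs, PySem.Dict.keys_insert_of_not_contains d w hdc])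
            (by rw [PySem.Dict.keys_insert_of_not_contains d w hdc]
                simp only [List.nodup_append, List.nodup_cons, List.not_mem_nil,
                  not_false_eq_true, List.nodup_nil, hnd, true_and]
                exact fun a ha b hb h => hnmem ((List.mem_singleton.mp hb ▸ h ▸ ha))),
          PySem.Dict.get?_insert_of_ne d w (fun h => heq h.symm)]

-- B's grouping dict: each key holds exactly its group, in input order
theorem rcd_groups_getD (words : List String) (k : String) :
    (rcd_groups words).getD k [] = words.filter (fun w => PySem.Str.lower w == k) := by
  unfold rcd_groups
  have h := PySem.Dict.getD_foldl_modify_append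
    (l := words.map (fun w => (PySem.Str.lower w, w))) (d := PySem.Dict.empty) (c := k)
  rw [List.foldl_map] at h
  rw [h]
  simp only [List.filter_map, List.map_map, Function.comp_def, PySem.Dict.getD_empty,
    List.nil_append]
  exact List.map_id _

-- B's grouping dict: same keys, same order, as A's dict
theorem rcd_groups_keys (words : List String) :
    (rcd_groups words).keys = PySem.Set.ofList (words.map PySem.Str.lower) := by
  unfold rcd_groups
  rw [PySem.Dict.keys_foldl_modify_key]
  simp [PySem.Set.update_nil_left]

theorem rcd_eq (words : List String) :
    remove_case_duplicates words = remove_case_duplicates_alt words := by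
  have hkeysA := rcd_keys words PySem.Set.empty PySem.Dict.empty rfl
  simp only [PySem.Dict.keys_empty, PySem.Set.update_nil_left] at hkeysA
  have hndA : (words.foldl rcdStep (PySem.Set.empty, PySem.Dict.empty)).2.keys.Nodup := by
    rw [hkeysA]; exact PySem.Set.nodup_ofList _
  have hndB : (rcd_groups words).keys.Nodup := by
    rw [rcd_groups_keys]; exact PySem.Set.nodup_ofList _
  unfold remove_case_duplicates remove_case_duplicates_alt
  rw [PySem.List.foldl_append_singleton_eq_map
      (f := fun p : String × List String => if p.1 ∈ p.2 then p.1 else PySem.List.pyGetD p.2 0 ""),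
    List.nil_append,
    PySem.Dict.items_eq_map_keys _ hndB [],
    PySem.Dict.values_eq_map_keys _ hndA "",
    List.map_map, hkeysA, rcd_groups_keys]
  apply List.map_congr_left
  intro k hk
  have hkL : k ∈ words.map PySem.Str.lower := (PySem.Set.mem_ofList _ _).mp hk
  have hgne : words.filter (fun w => PySem.Str.lower w == k) ≠ [] := by
    obtain ⟨w, hw, hlw⟩ := List.mem_map.mp hkL
    exact List.ne_nil_of_mem (List.mem_filter.mpr ⟨hw, by simp [hlw]⟩)
  rw [PySem.Dict.getD_eq_get?_getD, rcd_get? words PySem.Set.empty PySem.Dict.empty (by simp) (by simp) k]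
  simp only [Function.comp_def, rcd_groups_getD]
  by_cases hkg : k ∈ words.filter (fun w => PySem.Str.lower w == k)
  · simp [hkg]
  · cases hg : words.filter (fun w => PySem.Str.lower w == k) with
    | nil => exact absurd hg hgne
    | cons a t =>
      rw [hg] at hkg
      simp [hkg, PySem.Dict.get?_empty, PySem.List.pyGetD, PySem.List.pyGet?, PySem.List.pyIdx?]

-- ===== VERDICT (by name: the statement is the Claim_ definition above) =====
theorem remove_case_duplicates_spec : Claim_equal_remove_case_duplicates := by
  intro words _
  unfold Spec_remove_case_duplicates
  exact rcd_eq words
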